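-- pv_equiv track=rewrite | github.com/khursanirevo/snacvc | research/tokenization/compare_bpe.py | learn_vocab
-- ===== SOURCE A (Python) =====
-- from typing import List, Dict, Any, Tuple
--
-- def learn_vocab(tokens: List[int], num_merges: int) -> List[Tuple[int, int]]:
--     """Learn BPE merge rules from token sequence."""
--     # Count all adjacent pairs
--     vocab = {}
--     for i in range(len(tokens) - 1):
--         pair = (tokens[i], tokens[i + 1])
--         vocab[pair] = vocab.get(pair, 0) + 1
--
--     # Learn merge rules
--     merge_rules = []
--     for _ in range(num_merges):
--         if not vocab:
--             break
--
--         # Get most frequent pair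
--         best_pair = max(vocab.items(), key=lambda x: x[1])[0]
--         merge_rules.append(best_pair)
--
--         # Rebuild vocab with merged pair
--         vocab = {}
--         i = 0
--         while i < len(tokens) - 1:
--             if i < len(tokens) - 1 and (tokens[i], tokens[i + 1]) == best_pair:
--                 i += 2
--             else:
--                 pair = (tokens[i], tokens[i + 1]) if i < len(tokens) - 1 else None
--                 if pair:
--                     vocab[pair] = vocab.get(pair, 0) + 1
--                 i += 1
--
--     return merge_rules
-- ===== SOURCE B (Python) =====
-- from typing import List, Tuple, Optional
--
--
-- def learn_vocab(tokens: List[int], num_merges: int) -> List[Tuple[int, int]]: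
--     """Learn BPE merge rules.
--
--     The rebuilt pair counts depend only on the previously chosen pair (the
--     token list never changes), so the best-pair sequence is an iterated
--     deterministic transition: it is eventually periodic.  B follows the
--     sequence until it revisits a pair, then emits the answer arithmetically
--     as prefix + cycle * q + cycle[:r] with no further per-merge work.  The
--     per-pair counts are obtained by splitting the token list into segments
--     at the greedy matches of the skipped pair and counting inside segments.
--     """
--
--     def best_pair(skip: Optional[Tuple[int, int]]) -> Optional[Tuple[int, int]]:
--         if skip is None:
--             segs = [tokens]
--         else:
--             segs = []
--             cur: List[int] = []
--             i = 0
--             while i < len(tokens):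
--                 if i + 1 < len(tokens) and (tokens[i], tokens[i + 1]) == skip:
--                     cur.append(tokens[i])
--                     segs.append(cur)
--                     cur = []
--                     i += 2
--                 else:
--                     cur.append(tokens[i])
--                     i += 1
--             segs.append(cur)
--         counts = {}
--         for seg in segs:
--             for x, y in zip(seg, seg[1:]):
--                 counts[(x, y)] = counts.get((x, y), 0) + 1
--         if not counts:
--             return None
--         return max(counts.items(), key=lambda kv: kv[1])[0]
--
--     seq: List[Tuple[int, int]] = []
--     index = {}
--     cur = best_pair(None)
--     while cur is not None and cur not in index and len(seq) < num_merges: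
--         index[cur] = len(seq)
--         seq.append(cur)
--         cur = best_pair(cur)
--     if cur is None or len(seq) >= num_merges:
--         return seq[:num_merges]
--     start = index[cur]
--     prefix, cycle = seq[:start], seq[start:]
--     q, r = divmod(num_merges - start, len(cycle))
--     return prefix + cycle * q + cycle[:r]
-- ===== Notes on version B (the rewrite author's own statement) =====
-- stated objective: faster
-- what changed: A runs one O(n) recount-and-max pass per requested merge; B exploits that the recount depends only on the previously chosen pair, so it follows the best-pair sequence only until a pair repeats, then emits the whole answer arithmetically as prefix + cycle*q + cycle[:r]; each per-pair count is computed by splitting the tokens into segments at greedy matches and counting inside segments, instead of A's skip-scan.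
import Mathlib
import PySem

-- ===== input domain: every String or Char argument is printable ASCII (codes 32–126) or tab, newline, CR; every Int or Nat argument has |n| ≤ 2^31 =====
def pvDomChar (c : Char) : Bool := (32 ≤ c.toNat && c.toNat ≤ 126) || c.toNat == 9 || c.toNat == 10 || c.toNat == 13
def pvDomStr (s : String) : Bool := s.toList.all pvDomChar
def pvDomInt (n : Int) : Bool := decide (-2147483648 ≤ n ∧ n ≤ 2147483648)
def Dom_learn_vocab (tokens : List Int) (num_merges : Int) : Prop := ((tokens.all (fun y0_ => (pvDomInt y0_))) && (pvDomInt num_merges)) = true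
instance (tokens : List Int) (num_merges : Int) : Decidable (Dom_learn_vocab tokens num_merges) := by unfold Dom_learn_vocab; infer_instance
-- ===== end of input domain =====

-- B is faster: it follows the deterministic best-pair transition only until a pair repeats,
-- then emits the answer as prefix ++ cycle*q ++ cycle[:r]; counts come from splitting the
-- tokens into segments at greedy matches instead of A's per-merge skip-scan.


-- ===== PORT A =====
-- the initial count loop: for i in range(len(tokens)-1): vocab[pair] = vocab.get(pair,0)+1
def countAllA : List Int → PySem.Dict (Int × Int) Int → PySem.Dict (Int × Int) Int
  | a :: b :: rest, d => countAllA (b :: rest) (d.insert (a, b) (d.getD (a, b) 0 + 1))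
  | _, d => d
termination_by l _ => l.length

-- the rebuild while-loop: skip (i += 2) on the best pair, else count and i += 1
def rebuildA (best : Int × Int) : List Int → PySem.Dict (Int × Int) Int → PySem.Dict (Int × Int) Int
  | a :: b :: rest, d =>
      if (a, b) = best then rebuildA best rest d
      else rebuildA best (b :: rest) (d.insert (a, b) (d.getD (a, b) 0 + 1))
  | _, d => d
termination_by l _ => l.length

-- for _ in range(num_merges): break on empty vocab; append best; rebuild
def loopA (tokens : List Int) : Nat → PySem.Dict (Int × Int) Int → List (Int × Int) → List (Int × Int)
  | 0, _, rules => rules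
  | n + 1, vocab, rules =>
      if vocab.size = 0 then rules
      else
        match PySem.List.max? vocab.items (fun x => x.2) with
        | none => rules  -- unreachable: vocab nonempty
        | some m => loopA tokens n (rebuildA m.1 tokens PySem.Dict.empty) (rules ++ [m.1])

def learn_vocab (tokens : List Int) (num_merges : Int) : List (Int × Int) :=
  loopA tokens num_merges.toNat (countAllA tokens PySem.Dict.empty) []

-- ===== PORT B =====
-- best_pair's splitting while-loop: a greedy match of `skip` closes the current
-- segment after its first token and drops its second
def goSplit (skip : Int × Int) : List Int → List Int → List (List Int) → List (List Int)
  | t :: u :: rest, cur, segs =>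
      if (t, u) = skip then goSplit skip rest [] (segs ++ [cur ++ [t]])
      else goSplit skip (u :: rest) (cur ++ [t]) segs
  | [t], cur, segs => segs ++ [cur ++ [t]]
  | [], cur, segs => segs ++ [cur]
termination_by l _ _ => l.length

-- for x, y in zip(seg, seg[1:]): counts[(x,y)] = counts.get((x,y),0) + 1
def countSegB : List Int → PySem.Dict (Int × Int) Int → PySem.Dict (Int × Int) Int
  | x :: y :: rest, d => countSegB (y :: rest) (d.insert (x, y) (d.getD (x, y) 0 + 1))
  | _, d => d
termination_by l _ => l.length

def bestPairB (tokens : List Int) (skip : Option (Int × Int)) : Option (Int × Int) :=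
  let segs := match skip with
    | none => [tokens]
    | some p => goSplit p tokens [] []
  let counts := segs.foldl (fun d seg => countSegB seg d) PySem.Dict.empty
  match PySem.List.max? counts.items (fun kv => kv.2) with
  | none => none
  | some m => some m.1

-- while cur is not None and cur not in index and len(seq) < num_merges: …
-- (fuel = num_merges - len(seq) realises the third conjunct)
def loopB (tokens : List Int) :
    Nat → PySem.Dict (Int × Int) Int → List (Int × Int) → Option (Int × Int) →
    (List (Int × Int)) × PySem.Dict (Int × Int) Int × Option (Int × Int)
  | 0, idx, seq, cur => (seq, idx, cur)
  | n + 1, idx, seq, cur =>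
      match cur with
      | none => (seq, idx, none)
      | some p =>
          if idx.contains p then (seq, idx, some p)
          else loopB tokens n (idx.insert p (seq.length : Int)) (seq ++ [p]) (bestPairB tokens (some p))

-- the code after the loop: slice out, or emit prefix + cycle*q + cycle[:r]
def postB (num_merges : Int) :
    (List (Int × Int)) × PySem.Dict (Int × Int) Int × Option (Int × Int) → List (Int × Int)
  | (seq, idx, cur) =>
      match cur with
      | none => PySem.List.slice seq none (some num_merges)
      | some p =>
          if (seq.length : Int) ≥ num_merges then PySem.List.slice seq none (some num_merges)
          else
            match idx.get? p with
            | none => []  -- unreachable: Python's `cur in index` holds here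
            | some start =>
                let prefx := PySem.List.slice seq none (some start)
                let cyc := PySem.List.slice seq (some start) none
                match PySem.Int.divmod? (num_merges - start) (cyc.length : Int) with
                | none => []  -- unreachable: cyc is nonempty here
                | some (q, r) => prefx ++ PySem.List.pyRepeat cyc q ++ PySem.List.slice cyc none (some r)

def learn_vocab_alt (tokens : List Int) (num_merges : Int) : List (Int × Int) :=
  postB num_merges (loopB tokens num_merges.toNat PySem.Dict.empty [] (bestPairB tokens none))

-- ===== PRECONDITION & SPEC =====
def Spec_learn_vocab (tokens : List Int) (num_merges : Int) (out : List (Int × Int)) : Prop := out = learn_vocab_alt tokens num_merges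
instance (tokens : List Int) (num_merges : Int) (out : List (Int × Int)) : Decidable (Spec_learn_vocab tokens num_merges out) := by unfold Spec_learn_vocab; infer_instance

-- ===== CLAIM (what is proved, stated in full; the proofs are below) =====
def Claim_equal_learn_vocab : Prop := ∀ (tokens : List Int) (num_merges : Int), Dom_learn_vocab tokens num_merges → Spec_learn_vocab tokens num_merges (learn_vocab tokens num_merges)

-- ===== LEMMAS AND PROOFS =====

-- the first maximal pair of a counting dict (what both programs take max of)
def optBest (d : PySem.Dict (Int × Int) Int) : Option (Int × Int) :=
  match PySem.List.max? d.items (fun x => x.2) with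
  | none => none
  | some m => some m.1

-- the deterministic best-pair transition A iterates
def FA (tokens : List Int) (b : Int × Int) : Option (Int × Int) :=
  optBest (rebuildA b tokens PySem.Dict.empty)

-- iterate a partial function: the emitted list and the state after n steps
def iterL {α : Type} (f : α → Option α) : Option α → Nat → List α
  | _, 0 => []
  | none, _ + 1 => []
  | some b, n + 1 => b :: iterL f (f b) n

def stN {α : Type} (f : α → Option α) : Option α → Nat → Option α
  | s, 0 => s
  | none, _ + 1 => none
  | some b, n + 1 => stN f (f b) n

theorem stN_none {α : Type} (f : α → Option α) (n : Nat) : stN f none n = none := by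
  cases n <;> rfl

theorem iterL_none {α : Type} (f : α → Option α) (n : Nat) : iterL f none n = [] := by
  cases n <;> rfl

theorem stN_add {α : Type} (f : α → Option α) (a b : Nat) :
    ∀ s, stN f s (a + b) = stN f (stN f s a) b := by
  induction a with
  | zero => intro s; simp [stN]
  | succ a ih =>
    intro s
    cases s with
    | none => simp [stN_none]
    | some x =>
      have h : a + 1 + b = (a + b) + 1 := by omega
      rw [h]
      show stN f (f x) (a + b) = _
      rw [ih]
      rfl

theorem iterL_add {α : Type} (f : α → Option α) (a b : Nat) :
    ∀ s, iterL f s (a + b) = iterL f s a ++ iterL f (stN f s a) b := by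
  induction a with
  | zero => intro s; simp [iterL, stN]
  | succ a ih =>
    intro s
    cases s with
    | none => simp [iterL_none, stN_none]
    | some x =>
      have h : a + 1 + b = (a + b) + 1 := by omega
      rw [h]
      show x :: iterL f (f x) (a + b) = (x :: iterL f (f x) a) ++ _
      rw [ih]
      rfl

theorem length_iterL {α : Type} (f : α → Option α) (n : Nat) :
    ∀ s, stN f s n ≠ none → (iterL f s n).length = n := by
  induction n with
  | zero => intro s _; rfl
  | succ n ih =>
    intro s h
    cases s with
    | none => simp [stN_none] at h
    | some b =>
      show (b :: iterL f (f b) n).length = n + 1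
      rw [List.length_cons, ih (f b) h]

theorem stN_ne_none_of_le {α : Type} (f : α → Option α) {m n : Nat} (hm : m ≤ n) {s : Option α}
    (h : stN f s n ≠ none) : stN f s m ≠ none := by
  intro hnone
  apply h
  have : n = m + (n - m) := by omega
  rw [this, stN_add, hnone, stN_none]

theorem iterL_take {α : Type} (f : α → Option α) {m n : Nat} (hm : m ≤ n) (s : Option α)
    (h : stN f s m ≠ none) : (iterL f s n).take m = iterL f s m := by
  have : n = m + (n - m) := by omega
  rw [this, iterL_add]
  rw [List.take_append_of_le_length (by rw [length_iterL f m s h])]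
  rw [List.take_of_length_le (by rw [length_iterL f m s h])]

-- pumping a cycle: if the state returns to p after c steps, the emission is periodic
theorem iterL_pump {α : Type} (f : α → Option α) (p : α) (c : Nat)
    (hc : stN f (some p) c = some p) (q r : Nat) :
    iterL f (some p) (c * q + r)
      = (List.replicate q (iterL f (some p) c)).flatten ++ iterL f (some p) r := by
  induction q with
  | zero => simp
  | succ q ih =>
    have : c * (q + 1) + r = c + (c * q + r) := by ring
    rw [this, iterL_add, hc, ih]
    simp [List.replicate_succ]

-- ---- A's loop is the iteration of FA ----
theorem loopA_eq (tokens : List Int) (n : Nat) :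
    ∀ (vocab : PySem.Dict (Int × Int) Int) rules,
      loopA tokens n vocab rules = rules ++ iterL (FA tokens) (optBest vocab) n := by
  induction n with
  | zero => intro vocab rules; simp [loopA, iterL]
  | succ n ih =>
    intro vocab rules
    cases hmax : PySem.List.max? vocab.items (fun x => x.2) with
    | none =>
      have hit : vocab.items = [] := (PySem.List.max?_eq_none_iff _ _).mp hmax
      have hsz : vocab.size = 0 := by simp [PySem.Dict.size, hit]
      have hob : optBest vocab = none := by simp [optBest, hmax]
      simp [loopA, hsz, hob, iterL_none]
    | some m =>
      have hmem : m ∈ vocab.items := PySem.List.max?_mem hmax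
      have hsz : ¬ vocab.size = 0 := by
        simp only [PySem.Dict.size]
        intro h
        rw [List.length_eq_zero_iff] at h
        rw [h] at hmem
        simp at hmem
      have hob : optBest vocab = some m.1 := by simp [optBest, hmax]
      rw [hob]
      simp only [loopA]
      rw [if_neg hsz, hmax]
      show loopA tokens n (rebuildA m.1 tokens PySem.Dict.empty) (rules ++ [m.1]) = _
      rw [ih]
      show _ = rules ++ (m.1 :: iterL (FA tokens) (FA tokens m.1) n)
      simp [FA]

-- ---- pair streams: both counting loops bump a dict along a list of pairs ----
def pairsOf : List Int → List (Int × Int)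
  | x :: y :: rest => (x, y) :: pairsOf (y :: rest)
  | _ => []
termination_by l => l.length

def rpairs (skip : Int × Int) : List Int → List (Int × Int)
  | a :: b :: rest => if (a, b) = skip then rpairs skip rest else (a, b) :: rpairs skip (b :: rest)
  | _ => []
termination_by l => l.length

def bump (d : PySem.Dict (Int × Int) Int) (ps : List (Int × Int)) : PySem.Dict (Int × Int) Int :=
  ps.foldl (fun d pr => d.insert pr (d.getD pr 0 + 1)) d

theorem rebuildA_eq_bump (p : Int × Int) (l : List Int) (d : PySem.Dict (Int × Int) Int) :
    rebuildA p l d = bump d (rpairs p l) := by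
  fun_induction rebuildA p l d <;> simp_all [rpairs, bump]

theorem countSegB_eq_bump (l : List Int) (d : PySem.Dict (Int × Int) Int) :
    countSegB l d = bump d (pairsOf l) := by
  fun_induction countSegB l d <;> simp_all [pairsOf, bump]

theorem countAllA_eq_bump (l : List Int) (d : PySem.Dict (Int × Int) Int) :
    countAllA l d = bump d (pairsOf l) := by
  fun_induction countAllA l d <;> simp_all [pairsOf, bump]

theorem bump_append (d : PySem.Dict (Int × Int) Int) (ps qs : List (Int × Int)) :
    bump d (ps ++ qs) = bump (bump d ps) qs := by
  simp [bump, List.foldl_append]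

theorem foldl_countSegB_eq_bump (segs : List (List Int)) :
    ∀ d, segs.foldl (fun d seg => countSegB seg d) d = bump d (segs.flatMap pairsOf) := by
  induction segs with
  | nil => intro d; simp [bump]
  | cons s t ih =>
    intro d
    rw [List.foldl_cons, ih, countSegB_eq_bump, List.flatMap_cons, bump_append]

-- ---- the segment split emits exactly the pairs A's rebuild scan counts ----
def bridge : Option Int → Int → List (Int × Int)
  | none, _ => []
  | some x, t => [(x, t)]

def bridgeH (prev : Option Int) : List Int → List (Int × Int)
  | t :: _ => bridge prev t
  | [] => []

theorem pairsOf_cons_cons (x y : Int) (l : List Int) :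
    pairsOf (x :: y :: l) = (x, y) :: pairsOf (y :: l) := by
  rw [pairsOf]

theorem pairsOf_concat (cur : List Int) (t : Int) :
    pairsOf (cur ++ [t]) = pairsOf cur ++ bridge cur.getLast? t := by
  induction cur with
  | nil => simp [pairsOf, bridge]
  | cons a tl ih =>
    cases tl with
    | nil => simp [pairsOf, bridge]
    | cons b tl' =>
      rw [show (a :: b :: tl') ++ [t] = a :: ((b :: tl') ++ [t]) by simp]
      rw [show a :: ((b :: tl') ++ [t]) = a :: b :: (tl' ++ [t]) by simp]
      rw [pairsOf_cons_cons, pairsOf_cons_cons]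
      rw [show b :: (tl' ++ [t]) = (b :: tl') ++ [t] from rfl, ih]
      simp [List.getLast?_cons_cons]

theorem goSplit_pairs (skip : Int × Int) (rest cur : List Int) (segs : List (List Int)) :
    (goSplit skip rest cur segs).flatMap pairsOf
      = segs.flatMap pairsOf ++ pairsOf cur ++ bridgeH cur.getLast? rest ++ rpairs skip rest := by
  fun_induction goSplit skip rest cur segs with
  | case1 t u rest cur segs hcond ih =>
    rw [ih]
    cases rest <;>
      simp [List.flatMap_append, pairsOf_concat, rpairs, hcond, bridgeH, bridge, pairsOf]
  | case2 t u rest cur segs hcond ih =>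
    rw [ih]
    simp [rpairs, hcond, bridgeH, pairsOf_concat, bridge]
  | case3 t cur segs =>
    simp [List.flatMap_append, pairsOf_concat, rpairs, bridgeH]
  | case4 cur segs =>
    simp [List.flatMap_append, rpairs, bridgeH]

-- ---- bestPairB computes FA / the initial best pair ----
theorem bestPairB_none (tokens : List Int) :
    bestPairB tokens none = optBest (countAllA tokens PySem.Dict.empty) := by
  simp [bestPairB, optBest, countSegB_eq_bump, countAllA_eq_bump, bump]

theorem bestPairB_some (tokens : List Int) (p : Int × Int) :
    bestPairB tokens (some p) = FA tokens p := by
  have hflat : (goSplit p tokens [] []).flatMap pairsOf = rpairs p tokens := by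
    rw [goSplit_pairs]
    cases tokens <;> simp [pairsOf, bridgeH, bridge]
  simp only [bestPairB, FA, optBest, foldl_countSegB_eq_bump, hflat, rebuildA_eq_bump]

-- ---- B's loop + postprocessing equals the iteration of FA ----
theorem loopB_post_eq (tokens : List Int) (num : Int) (fuel : Nat) :
    ∀ (idx : PySem.Dict (Int × Int) Int) (seq : List (Int × Int)) (cur : Option (Int × Int)),
      fuel + seq.length = num.toNat →
      seq = iterL (FA tokens) (bestPairB tokens none) seq.length →
      cur = stN (FA tokens) (bestPairB tokens none) seq.length →
      (∀ p j, idx.get? p = some j → ∃ jn : Nat, j = (jn : Int) ∧ jn < seq.length ∧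
          stN (FA tokens) (bestPairB tokens none) jn = some p) →
      postB num (loopB tokens fuel idx seq cur)
        = iterL (FA tokens) (bestPairB tokens none) num.toNat := by
  induction fuel with
  | zero =>
    intro idx seq cur hlen hseq hcur _
    have hN : seq.length = num.toNat := by omega
    have hslice : PySem.List.slice seq none (some num) = seq := by
      by_cases h0 : 0 ≤ num
      · rw [PySem.List.slice_to seq h0, List.take_of_length_le (by omega)]
      · have hnil : seq = [] := List.length_eq_zero_iff.mp (by omega)
        subst hnil; simp [PySem.List.slice]
    show postB num (seq, idx, cur) = _
    cases cur with
    | none =>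
      show PySem.List.slice seq none (some num) = _
      rw [hslice, hseq, hN]
    | some p =>
      have hge : ((seq.length : Int) ≥ num) := by
        rw [hN]; exact Int.self_le_toNat num
      show (if (seq.length : Int) ≥ num then PySem.List.slice seq none (some num) else _) = _
      rw [if_pos hge, hslice, hseq, hN]
  | succ n ih =>
    intro idx seq cur hlen hseq hcur hidx
    cases cur with
    | none =>
      show postB num (seq, idx, none) = _
      show PySem.List.slice seq none (some num) = _
      have hiter : iterL (FA tokens) (bestPairB tokens none) num.toNat = seq := by
        rw [show num.toNat = seq.length + (num.toNat - seq.length) by omega, iterL_add,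
            ← hcur, iterL_none, ← hseq, List.append_nil]
      have h0 : 0 ≤ num := by omega
      rw [PySem.List.slice_to seq h0, List.take_of_length_le (by omega), hiter]
    | some p =>
      have hstep : loopB tokens (n+1) idx seq (some p)
          = if idx.contains p then (seq, idx, some p)
            else loopB tokens n (idx.insert p (seq.length : Int)) (seq ++ [p])
                   (bestPairB tokens (some p)) := rfl
      cases hc : idx.contains p
      case true =>
        rw [hstep, if_pos hc]
        have hj : ∃ j, idx.get? p = some j := by
          have h := PySem.Dict.contains_eq_isSome_get? idx p
          rw [hc] at h
          cases hg : idx.get? p with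
          | none => rw [hg] at h; simp at h
          | some j => exact ⟨j, rfl⟩
        obtain ⟨j, hj⟩ := hj
        obtain ⟨jn, rfl, hjlt, hstj⟩ := hidx p j hj
        have hpos : 0 < num := by omega
        have hnum : ((num.toNat : Nat) : Int) = num := Int.toNat_of_nonneg (le_of_lt hpos)
        have hlt : ¬ ((seq.length : Int) ≥ num) := by omega
        simp only [postB, if_neg hlt, hj]
        have hstL : stN (FA tokens) (bestPairB tokens none) seq.length = some p := hcur.symm
        have hcpos : 0 < seq.length - jn := by omega
        have hcyc : stN (FA tokens) (some p) (seq.length - jn) = some p := by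
          have := stN_add (FA tokens) jn (seq.length - jn) (bestPairB tokens none)
          rw [show jn + (seq.length - jn) = seq.length by omega, hstj] at this
          rw [← this, hstL]
        have hseq_split : seq = iterL (FA tokens) (bestPairB tokens none) jn
            ++ iterL (FA tokens) (some p) (seq.length - jn) := by
          have h1 := iterL_add (FA tokens) jn (seq.length - jn) (bestPairB tokens none)
          rw [hstj, show jn + (seq.length - jn) = seq.length by omega] at h1
          rw [← h1]
          exact hseq
        have hlen_pre : (iterL (FA tokens) (bestPairB tokens none) jn).length = jn :=
          length_iterL _ jn _ (by rw [hstj]; simp)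
        have hclen : (iterL (FA tokens) (some p) (seq.length - jn)).length = seq.length - jn :=
          length_iterL _ _ _ (by rw [hcyc]; simp)
        have hpre : PySem.List.slice seq none (some (jn : Int))
            = iterL (FA tokens) (bestPairB tokens none) jn := by
          rw [PySem.List.slice_to_natCast]
          conv_lhs => rw [hseq_split]
          rw [List.take_append_of_le_length hlen_pre.ge, List.take_of_length_le hlen_pre.le]
        have hcyclist : PySem.List.slice seq (some (jn : Int)) none
            = iterL (FA tokens) (some p) (seq.length - jn) := by
          have hd := List.drop_left (l₁ := iterL (FA tokens) (bestPairB tokens none) jn)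
            (l₂ := iterL (FA tokens) (some p) (seq.length - jn))
          rw [hlen_pre] at hd
          rw [PySem.List.slice_from_natCast]
          conv_lhs => rw [hseq_split]
          exact hd
        rw [hpre, hcyclist, hclen]
        have hne : ((seq.length - jn : Nat) : Int) ≠ 0 := by omega
        have hM : num - (jn : Int) = ((num.toNat - jn : Nat) : Int) := by omega
        have hmodlt : (num.toNat - jn) % (seq.length - jn) < seq.length - jn :=
          Nat.mod_lt _ hcpos
        have hRHS : iterL (FA tokens) (bestPairB tokens none) num.toNat
            = iterL (FA tokens) (bestPairB tokens none) jn
              ++ ((List.replicate ((num.toNat - jn) / (seq.length - jn))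
                    (iterL (FA tokens) (some p) (seq.length - jn))).flatten
                  ++ iterL (FA tokens) (some p) ((num.toNat - jn) % (seq.length - jn))) := by
          conv_lhs => rw [show num.toNat = jn + (num.toNat - jn) by omega]
          rw [iterL_add, hstj]
          congr 1
          conv_lhs =>
            rw [show num.toNat - jn
                  = (seq.length - jn) * ((num.toNat - jn) / (seq.length - jn))
                    + (num.toNat - jn) % (seq.length - jn) from (Nat.div_add_mod _ _).symm]
          rw [iterL_pump (FA tokens) p (seq.length - jn) hcyc]
        have htake : (iterL (FA tokens) (some p) (seq.length - jn)).take
              ((num.toNat - jn) % (seq.length - jn))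
            = iterL (FA tokens) (some p) ((num.toNat - jn) % (seq.length - jn)) :=
          iterL_take (FA tokens) (le_of_lt hmodlt) (some p)
            (stN_ne_none_of_le (FA tokens) (le_of_lt hmodlt) (by rw [hcyc]; simp))
        simp only [PySem.Int.divmod?, if_neg hne, hM]
        rw [hRHS]
        simp only [PySem.List.pyRepeat, ← Int.ofNat_fdiv, ← Int.ofNat_fmod,
          Int.toNat_natCast, PySem.List.slice_to_natCast, htake, List.append_assoc]
      case false =>
        -- continue: one genuinely new transition, recorded in the index
        rw [hstep, if_neg (by simp [hc])]
        apply ih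
        · simp; omega
        · rw [List.length_append, List.length_cons, List.length_nil]
          rw [iterL_add, ← hcur]
          show seq ++ [p] = _ ++ iterL (FA tokens) (some p) 1
          rw [← hseq]
          rfl
        · rw [List.length_append, List.length_cons, List.length_nil]
          rw [stN_add, ← hcur]
          show bestPairB tokens (some p) = stN (FA tokens) (FA tokens p) 0
          rw [bestPairB_some]
          rfl
        · intro q j h
          rw [PySem.Dict.get?_insert] at h
          by_cases hq : q = p
          · rw [if_pos hq] at h
            refine ⟨seq.length, (Option.some_inj.mp h).symm, by simp, ?_⟩
            rw [← hcur, hq]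
          · rw [if_neg hq] at h
            obtain ⟨jn, rfl, hlt2, hst⟩ := hidx q j h
            exact ⟨jn, rfl, by simp; omega, hst⟩

-- ===== VERDICT (by name: the statement is the Claim_ definition above) =====
theorem learn_vocab_spec : Claim_equal_learn_vocab := by
  intro tokens num _
  unfold Spec_learn_vocab learn_vocab learn_vocab_alt
  rw [loopA_eq, ← bestPairB_none]
  rw [loopB_post_eq tokens num num.toNat PySem.Dict.empty [] (bestPairB tokens none)
      (by simp) (by rfl) (by rfl)
      (by intro p j h; simp [PySem.Dict.empty, PySem.Dict.get?] at h)]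
  rfl
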